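-- pv_equiv track=rewrite | github.com/calendula547/python_advanced_2020_softuni_bg | python_advanced_2020/stacks_queues/matching_brackets.py | find_subexpressions
-- ===== SOURCE A (Python) =====
-- def find_subexpressions(expression):
--     opening_brackets = []
--     subexpressions = []
--     for el in range(len(expression)):
--         if expression[el] == "(":
--             opening_brackets.append(el)
--         elif expression[el] == ")":
--             start_index = opening_brackets.pop()
--             subexpressions.append(expression[start_index:el+1])
--     return subexpressions
-- ===== SOURCE B (Python) =====
-- def find_subexpressions(expression):
--     result = []
--     for el in range(len(expression)):
--         if expression[el] == ")":
--             balance = 1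
--             for start in range(el - 1, -1, -1):
--                 if expression[start] == ")":
--                     balance += 1
--                 elif expression[start] == "(":
--                     balance -= 1
--                     if balance == 0:
--                         result.append(expression[start:el + 1])
--                         break
--     return result
-- ===== Notes on version B (the rewrite author's own statement) =====
-- stated objective: alternative
-- what changed: Replaces A's stack of '(' positions by a stack-free loop that, at each ')', scans backward with a balance counter to find the matching '(' directly; Pre_ excludes strings with an unmatched ')' (a prefix containing more ')' than '('), on which A raises IndexError while B simply skips that ')'.
import Mathlib
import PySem

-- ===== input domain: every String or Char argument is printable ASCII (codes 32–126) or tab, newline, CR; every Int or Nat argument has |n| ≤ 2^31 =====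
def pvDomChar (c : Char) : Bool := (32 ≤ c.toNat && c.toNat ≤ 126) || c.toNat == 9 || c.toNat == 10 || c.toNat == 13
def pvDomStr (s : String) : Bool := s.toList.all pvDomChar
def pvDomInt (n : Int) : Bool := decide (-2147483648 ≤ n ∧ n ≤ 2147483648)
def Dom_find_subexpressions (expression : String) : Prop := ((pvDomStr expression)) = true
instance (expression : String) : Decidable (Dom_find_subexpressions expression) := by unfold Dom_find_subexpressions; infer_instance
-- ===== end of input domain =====

-- B replaces A's explicit stack of '(' positions by, at each ')', a backward balance
-- scan that locates the matching '(' directly (objective: alternative decomposition, same cost class).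

-- ===== PORT A =====
-- loop over the indices [0, …, len-1]; state = (stack of '(' positions, collected subexpressions);
-- `none` models the IndexError of `pop` on an empty list.
def pvALoop (chars : List Char) (stack : List Nat) (subs : List String) :
    List Nat → Option (List String)
  | [] => some subs
  | el :: rest =>
    if chars[el]? = some '(' then pvALoop chars (el :: stack) subs rest
    else if chars[el]? = some ')' then
      match stack with
      | [] => none
      | s :: stack' =>
          pvALoop chars stack'
            (subs ++ [String.ofList (PySem.List.slice chars (some (s : Int)) (some ((el : Int) + 1)))]) rest
    else pvALoop chars stack subs rest

-- range(len(expression)) = List.range chars.length (exact: nonnegative length, step 1)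
def find_subexpressions (expression : String) : List String :=
  (pvALoop expression.toList [] [] (List.range expression.toList.length)).getD []

-- ===== PORT B =====
-- the backward `for start in range(el-1, -1, -1)` scan: pvBScan chars balance j examines chars[j],
-- updates balance, returns the matching position, or `none` when the scan runs off the front
-- (B then simply moves on to the next index).
def pvBScan (chars : List Char) : Nat → Nat → Option Nat
  | balance, j =>
    let b' := if chars[j]? = some ')' then balance + 1
              else if chars[j]? = some '(' then balance - 1
              else balance
    if b' = 0 then some j
    else match j with
      | 0 => none
      | Nat.succ j' => pvBScan chars b' j'

-- B's outer for-loop: only ')' acts; el = 0 gives an empty backward range (skip)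
def pvBLoop (chars : List Char) (subs : List String) : List Nat → List String
  | [] => subs
  | el :: rest =>
    if chars[el]? = some ')' then
      match el with
      | 0 => pvBLoop chars subs rest
      | Nat.succ e =>
        match pvBScan chars 1 e with
        | none => pvBLoop chars subs rest
        | some s =>
            pvBLoop chars
              (subs ++ [String.ofList (PySem.List.slice chars (some (s : Int)) (some (((e + 1 : Nat) : Int) + 1)))]) rest
    else pvBLoop chars subs rest

def find_subexpressions_alt (expression : String) : List String :=
  pvBLoop expression.toList [] (List.range expression.toList.length)

-- ===== PRECONDITION & SPEC =====
-- Pre_ excludes exactly the strings with an unmatched ')' (some prefix has more ')' than '('),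
-- on which Python A raises IndexError (pop from empty list) while B skips the unmatched ')'.
def Pre_find_subexpressions (expression : String) : Prop :=
  ∀ i, i ≤ expression.toList.length →
    (expression.toList.take i).count ')' ≤ (expression.toList.take i).count '('
instance (expression : String) : Decidable (Pre_find_subexpressions expression) := by
  unfold Pre_find_subexpressions; infer_instance

def pvWitness_find_subexpressions : String := "a(b(c)d)(e)"

def Spec_find_subexpressions (expression : String) (out : List String) : Prop := out = find_subexpressions_alt expression
instance (expression : String) (out : List String) : Decidable (Spec_find_subexpressions expression out) := by unfold Spec_find_subexpressions; infer_instance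

-- ===== CLAIM (what is proved, stated in full; the proofs are below) =====
def Claim_equal_find_subexpressions : Prop := ∀ (expression : String), Dom_find_subexpressions expression → Pre_find_subexpressions expression → Spec_find_subexpressions expression (find_subexpressions expression)

-- ===== LEMMAS AND PROOFS =====

-- A's stack after processing the first i characters (pop on empty = stays empty;
-- Pre_ guarantees the loop never actually pops an empty stack).
def pvStackOf (chars : List Char) : Nat → List Nat
  | 0 => []
  | Nat.succ i =>
    let st := pvStackOf chars i
    if chars[i]? = some '(' then i :: st
    else if chars[i]? = some ')' then st.tail
    else st

theorem pvStackOf_succ (chars : List Char) (i : Nat) :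
    pvStackOf chars (i + 1)
      = (if chars[i]? = some '(' then i :: pvStackOf chars i
         else if chars[i]? = some ')' then (pvStackOf chars i).tail
         else pvStackOf chars i) := rfl

-- KEY LEMMA: the backward balance scan starting at index j with balance b+1 returns
-- exactly entry b of A's stack for the prefix chars[0..j] (its (b+1)-st most recent unmatched '(').
theorem pvBScan_eq_stackOf (chars : List Char) :
    ∀ (j b : Nat), pvBScan chars (b + 1) j = (pvStackOf chars (j + 1))[b]? := by
  intro j
  induction j with
  | zero =>
    intro b
    rw [pvStackOf_succ]
    by_cases h1 : chars[0]? = some '('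
    · rcases b with _ | s <;> simp [pvBScan, h1, pvStackOf]
    · by_cases h2 : chars[0]? = some ')' <;> simp [pvBScan, h1, h2, pvStackOf]
  | succ j ih =>
    intro b
    rw [pvStackOf_succ]
    by_cases h1 : chars[j + 1]? = some '('
    · rcases b with _ | s
      · simp [pvBScan, h1]
      · have hstep : pvBScan chars (s + 1 + 1) (j + 1) = pvBScan chars (s + 1) j := by
          simp [pvBScan, h1]
        rw [hstep, ih s, h1]
        simp
    · by_cases h2 : chars[j + 1]? = some ')'
      · have hstep : pvBScan chars (b + 1) (j + 1) = pvBScan chars (b + 2) j := by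
          simp [pvBScan, h2]
        rw [hstep, show b + 2 = (b + 1) + 1 from rfl, ih (b + 1)]
        simp [h2, List.getElem?_tail]
      · have hstep : pvBScan chars (b + 1) (j + 1) = pvBScan chars (b + 1) j := by
          simp [pvBScan, h1, h2]
        rw [hstep, ih b]
        simp [h1, h2]

-- under the prefix-balance condition, A's stack size is exactly the surplus of '(' over ')'
theorem pvStack_len (chars : List Char) :
    ∀ i, i ≤ chars.length →
      (∀ j, j ≤ i → (chars.take j).count ')' ≤ (chars.take j).count '(') →
      (pvStackOf chars i).length + (chars.take i).count ')' = (chars.take i).count '(' := by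
  intro i
  induction i with
  | zero => intro _ _; simp [pvStackOf]
  | succ i ih =>
    intro hle hpre
    have hlt : i < chars.length := hle
    have ih' := ih (le_of_lt hlt) (fun j hj => hpre j (Nat.le_succ_of_le hj))
    have htake : chars.take (i + 1) = chars.take i ++ [chars[i]] := by
      rw [List.take_add_one, List.getElem?_eq_getElem hlt]; rfl
    have hget : chars[i]? = some chars[i] := List.getElem?_eq_getElem hlt
    rw [pvStackOf_succ, hget]
    by_cases h1 : chars[i] = '('
    · have hc1 : (chars.take (i + 1)).count ')' = (chars.take i).count ')' := by
        rw [htake, List.count_append]; simp [h1]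
      have hc2 : (chars.take (i + 1)).count '(' = (chars.take i).count '(' + 1 := by
        rw [htake, List.count_append]; simp [h1]
      rw [if_pos (by rw [h1]), hc1, hc2]
      simp
      omega
    · by_cases h2 : chars[i] = ')'
      · have hc1 : (chars.take (i + 1)).count ')' = (chars.take i).count ')' + 1 := by
          rw [htake, List.count_append]; simp [h2]
        have hc2 : (chars.take (i + 1)).count '(' = (chars.take i).count '(' := by
          rw [htake, List.count_append]; simp [h2]
        have htl : (pvStackOf chars i).tail.length = (pvStackOf chars i).length - 1 :=
          List.length_tail
        have hcnt := hpre (i + 1) (le_refl _)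
        rw [hc1, hc2] at hcnt
        rw [if_neg (by simp [h2]), if_pos (by rw [h2]), hc1, hc2]
        omega
      · have hc1 : (chars.take (i + 1)).count ')' = (chars.take i).count ')' := by
          rw [htake, List.count_append]; simp [h2]
        have hc2 : (chars.take (i + 1)).count '(' = (chars.take i).count '(' := by
          rw [htake, List.count_append]; simp [h1]
        rw [if_neg (by simp [h1]), if_neg (by simp [h2]), hc1, hc2]
        omega

-- MAIN INVARIANT: starting at index i with A's stack being pvStackOf chars i,
-- under Pre_ A's loop returns `some` of B's loop value over the remaining indices.
theorem pvLoop_eq (chars : List Char)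
    (hpre : ∀ j, j ≤ chars.length → (chars.take j).count ')' ≤ (chars.take j).count '(') :
    ∀ (k i : Nat) (subs : List String), i + k = chars.length →
      pvALoop chars (pvStackOf chars i) subs (List.range' i k)
        = some (pvBLoop chars subs (List.range' i k)) := by
  intro k
  induction k with
  | zero => intro i subs _; simp [pvALoop, pvBLoop, List.range']
  | succ k ih =>
    intro i subs hlen
    have hlt : i < chars.length := by omega
    rw [List.range'_succ]
    by_cases h1 : chars[i]? = some '('
    · have hA : pvALoop chars (pvStackOf chars i) subs (i :: List.range' (i + 1) k)
          = pvALoop chars (i :: pvStackOf chars i) subs (List.range' (i + 1) k) := by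
        simp [pvALoop, h1]
      have hB : pvBLoop chars subs (i :: List.range' (i + 1) k)
          = pvBLoop chars subs (List.range' (i + 1) k) := by
        simp [pvBLoop, h1]
      have hst : i :: pvStackOf chars i = pvStackOf chars (i + 1) := by
        rw [pvStackOf_succ, h1]; simp
      rw [hA, hB, hst, ih (i + 1) subs (by omega)]
    · by_cases h2 : chars[i]? = some ')'
      · have hst : pvStackOf chars (i + 1) = (pvStackOf chars i).tail := by
          rw [pvStackOf_succ]; simp [h2]
        -- Pre_ forces A's stack nonempty at this ')'
        have hnem : pvStackOf chars i ≠ [] := by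
          have hl := pvStack_len chars i (le_of_lt hlt)
            (fun j hj => hpre j (by omega))
          have hcnt := hpre (i + 1) (by omega)
          have htake : chars.take (i + 1) = chars.take i ++ [chars[i]] := by
            rw [List.take_add_one, List.getElem?_eq_getElem hlt]; rfl
          have hgi : chars[i] = ')' := by
            have := List.getElem?_eq_getElem hlt
            rw [this] at h2; exact Option.some.inj h2
          rw [htake, hgi] at hcnt
          simp [List.count_append, List.count_nil] at hcnt
          intro hemp
          rw [hemp] at hl
          simp at hl
          omega
        rcases hsk : pvStackOf chars i with _ | ⟨s, st'⟩
        · exact absurd hsk hnem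
        have hA : pvALoop chars (s :: st') subs (i :: List.range' (i + 1) k)
            = pvALoop chars st'
                (subs ++ [String.ofList (PySem.List.slice chars (some (s : Int)) (some ((i : Int) + 1)))])
                (List.range' (i + 1) k) := by
          simp [pvALoop, h2]
        have hst' : st' = pvStackOf chars (i + 1) := by rw [hst, hsk]; rfl
        rcases hi : i with _ | e
        · -- i = 0 : A's stack is empty, contradicting hnem
          exfalso; apply hnem; rw [hi]; rfl
        · subst hi
          have hBsc : pvBScan chars 1 e = some s := by
            rw [show (1 : Nat) = 0 + 1 from rfl, pvBScan_eq_stackOf chars e 0, hsk]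
            rfl
          have hB : pvBLoop chars subs ((e + 1) :: List.range' (e + 1 + 1) k)
              = pvBLoop chars
                  (subs ++ [String.ofList (PySem.List.slice chars (some (s : Int)) (some (((e + 1 : Nat) : Int) + 1)))])
                  (List.range' (e + 1 + 1) k) := by
            simp [pvBLoop, h2, hBsc]
          rw [hA, hB, hst', ih (e + 1 + 1) _ (by omega)]
      · have hA : pvALoop chars (pvStackOf chars i) subs (i :: List.range' (i + 1) k)
            = pvALoop chars (pvStackOf chars i) subs (List.range' (i + 1) k) := by
          simp [pvALoop, h1, h2]
        have hB : pvBLoop chars subs (i :: List.range' (i + 1) k)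
            = pvBLoop chars subs (List.range' (i + 1) k) := by
          simp [pvBLoop, h2]
        have hst : pvStackOf chars i = pvStackOf chars (i + 1) := by
          rw [pvStackOf_succ]; simp [h1, h2]
        rw [hA, hB, hst, ih (i + 1) subs (by omega)]

-- ===== VERDICT (by name: the statements are the Claim_ definitions above) =====
theorem find_subexpressions_spec : Claim_equal_find_subexpressions := by
  intro expression _ hpre
  unfold Spec_find_subexpressions find_subexpressions find_subexpressions_alt
  rw [List.range_eq_range',
      show ([] : List Nat) = pvStackOf expression.toList 0 from rfl,
      pvLoop_eq expression.toList hpre expression.toList.length 0 [] (by omega)]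
  rfl
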